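-- pv_equiv track=rewrite | github.com/MohanaMeher/ACM-ICPC---Secret-Chamber-at-Mount-Rushmore | solution.py | check
-- ===== SOURCE A (Python) =====
-- def check(d,oc,tc,original):
-- 	queue = []
-- 	queue.append(oc)
-- 	while(len(queue)!=0 and queue[0]!=tc):
-- 		if queue[0] in d:
-- 			for v in d[queue[0]]:
-- 				if (v!=original):
-- 					queue.append(v)
-- 		queue.pop(0)
-- 	return len(queue) == 0
-- ===== SOURCE B (Python) =====
-- def check(d, oc, tc, original):
--     seen = {oc}
--     queue = [oc]
--     i = 0
--     while i < len(queue):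
--         u = queue[i]
--         i += 1
--         if u == tc:
--             return False
--         for w in d.get(u, []):
--             if w != original and w not in seen:
--                 seen.add(w)
--                 queue.append(w)
--     return True
-- ===== Notes on version B (the rewrite author's own statement) =====
-- stated objective: alternative
-- what changed: Replaces A's visited-less FIFO queue expansion (which re-enqueues nodes and diverges on reachable cycles) by a standard BFS with a visited set and an early return when tc is dequeued; Pre_ excludes exactly the inputs on which A's loop never terminates.
import Mathlib
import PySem

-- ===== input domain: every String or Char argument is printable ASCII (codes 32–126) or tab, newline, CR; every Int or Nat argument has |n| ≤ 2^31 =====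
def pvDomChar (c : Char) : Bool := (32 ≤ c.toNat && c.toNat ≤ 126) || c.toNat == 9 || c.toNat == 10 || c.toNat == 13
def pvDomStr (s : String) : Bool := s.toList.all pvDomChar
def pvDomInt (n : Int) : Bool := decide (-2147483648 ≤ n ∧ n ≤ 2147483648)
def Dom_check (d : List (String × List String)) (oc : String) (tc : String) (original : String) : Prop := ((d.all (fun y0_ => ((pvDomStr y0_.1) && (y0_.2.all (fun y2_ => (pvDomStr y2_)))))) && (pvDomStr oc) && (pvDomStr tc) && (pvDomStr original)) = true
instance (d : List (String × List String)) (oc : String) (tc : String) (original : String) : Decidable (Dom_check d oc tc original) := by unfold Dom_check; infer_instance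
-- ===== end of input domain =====

-- B replaces A's visited-less queue expansion (divergent on reachable cycles when tc
-- is unreachable) by a standard BFS with a visited set and an early return on tc.
-- A's unbounded while-loop, and B's, are ported with an explicit fuel counter
-- (scaffolding only: the proofs show the fuel suffices on every input admitted by
-- Pre_check, resp. on every input at all).

-- ===== PORT A =====
def checkFuel (dd : PySem.Dict String (List String)) : Nat :=
  ((dd.values.map List.length).foldl max 0 + 2) ^ ((dd.values.map List.length).sum + 3)

def checkLoop (dd : PySem.Dict String (List String)) (tc original : String) : Nat → List String → Bool
  | 0, queue => queue.isEmpty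
  | fuel+1, queue =>
    match queue with
    | [] => true
    | q0 :: rest =>
      if q0 = tc then false
      else checkLoop dd tc original fuel
        (rest ++ (if dd.contains q0 then (dd.getD q0 []).filter (fun v => v ≠ original) else []))

def check (d : List (String × List String)) (oc : String) (tc : String) (original : String) : Bool :=
  let dd := PySem.Dict.ofList d
  checkLoop dd tc original (checkFuel dd) [oc]

-- ===== PORT B =====
def bfsLoop (dd : PySem.Dict String (List String)) (tc original : String) :
    Nat → List String → List String → Bool
  | 0, _, queue => queue.isEmpty
  | fuel+1, seen, queue =>
    match queue with
    | [] => true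
    | u :: rest =>
      if u = tc then false
      else
        let p := (dd.getD u []).foldl (fun p2 w =>
          if w ≠ original ∧ w ∉ p2.1 then (p2.1 ++ [w], p2.2 ++ [w]) else p2) (seen, rest)
        bfsLoop dd tc original fuel p.1 p.2

def check_alt (d : List (String × List String)) (oc : String) (tc : String) (original : String) : Bool :=
  let dd := PySem.Dict.ofList d
  bfsLoop dd tc original (dd.values.flatten.length + 2) [oc] [oc]

-- ===== PRECONDITION & SPEC =====
-- spec-side helpers (used only by Pre_check, not by either port):
-- neighbours of u in the dict, skipping `original` (exactly what A may enqueue / B may add)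
def succs (dd : PySem.Dict String (List String)) (original : String) (u : String) : List String :=
  (dd.getD u []).filter (fun v => v ≠ original)

def bRound (dd : PySem.Dict String (List String)) (original : String) (reach : List String) : List String :=
  reach.foldl (fun r u =>
    (dd.getD u []).foldl (fun r2 w => if w ≠ original ∧ w ∉ r2 then r2 ++ [w] else r2) r) reach

def bIter (dd : PySem.Dict String (List String)) (original : String) : Nat → List String → List String
  | 0, r => r
  | n+1, r => bIter dd original n (bRound dd original r)

-- set of nodes reachable from `seed` along `succs` edges (bounded closure iteration)
def closeL (d : List (String × List String)) (original : String) (seed : List String) : List String :=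
  bIter (PySem.Dict.ofList d) original (((PySem.Dict.ofList d).values.map List.length).sum + 1)
    (PySem.List.dedup seed)

-- Pre_check excludes exactly the inputs on which A's while loop never returns: those where
-- tc is not reachable from oc (edges from d, targets equal to `original` skipped) while some
-- reachable node lies on a cycle — A has no visited set and re-enqueues such nodes forever.
def Pre_check (d : List (String × List String)) (oc : String) (tc : String) (original : String) : Prop :=
  tc ∈ closeL d original [oc] ∨
    ∀ u ∈ closeL d original [oc], u ∉ closeL d original (succs (PySem.Dict.ofList d) original u)

instance (d : List (String × List String)) (oc : String) (tc : String) (original : String) : Decidable (Pre_check d oc tc original) := by unfold Pre_check; infer_instance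

def pvWitness_check : (List (String × List String)) × String × String × String :=
  ([("a", ["b"])], "a", "b", "x")

def Spec_check (d : List (String × List String)) (oc : String) (tc : String) (original : String) (out : Bool) : Prop := out = check_alt d oc tc original
instance (d : List (String × List String)) (oc : String) (tc : String) (original : String) (out : Bool) : Decidable (Spec_check d oc tc original out) := by unfold Spec_check; infer_instance

-- ===== CLAIM (what is proved, stated in full; the proofs are below) =====
def Claim_equal_check : Prop := ∀ (d : List (String × List String)) (oc : String) (tc : String) (original : String), Dom_check d oc tc original → Pre_check d oc tc original → Spec_check d oc tc original (check d oc tc original)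

-- ===== LEMMAS AND PROOFS =====

-- paths along `succs`
def chainFrom (dd : PySem.Dict String (List String)) (original : String) : String → List String → Prop
  | _, [] => True
  | u, v :: l => v ∈ succs dd original u ∧ chainFrom dd original v l

def RPath (dd : PySem.Dict String (List String)) (original : String) (n : Nat) (u w : String) : Prop :=
  ∃ l : List String, l.length = n ∧ chainFrom dd original u l ∧ l.getLastD u = w

-- membership in the inner fold of bRound
theorem mem_innerF (original : String) (l r : List String) (x : String) :
    x ∈ l.foldl (fun r2 w => if w ≠ original ∧ w ∉ r2 then r2 ++ [w] else r2) r ↔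
      x ∈ r ∨ (x ∈ l ∧ x ≠ original) := by
  induction l generalizing r with
  | nil => simp
  | cons w l IH =>
    simp only [List.foldl_cons]
    by_cases h : w ≠ original ∧ w ∉ r
    · rw [if_pos h, IH]
      simp only [List.mem_append, List.mem_cons]
      constructor
      · rintro ((hr | (rfl | h0)) | ⟨hl, hno⟩)
        · exact Or.inl hr
        · exact Or.inr ⟨Or.inl rfl, h.1⟩
        · simp at h0
        · exact Or.inr ⟨Or.inr hl, hno⟩
      · rintro (hr | ⟨(rfl | hl), hno⟩)
        · exact Or.inl (Or.inl hr)
        · exact Or.inl (Or.inr (Or.inl rfl))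
        · exact Or.inr ⟨hl, hno⟩
    · rw [if_neg h, IH]
      simp only [List.mem_cons]
      constructor
      · rintro (hr | ⟨hl, hno⟩)
        · exact Or.inl hr
        · exact Or.inr ⟨Or.inr hl, hno⟩
      · rintro (hr | ⟨(rfl | hl), hno⟩)
        · exact Or.inl hr
        · rcases not_and_or.mp h with h1 | h1
          · exact absurd (not_not.mp h1) hno
          · exact Or.inl (not_not.mp h1)
        · exact Or.inr ⟨hl, hno⟩

theorem innerF_prefix (original : String) (l r : List String) :
    ∃ ext, l.foldl (fun r2 w => if w ≠ original ∧ w ∉ r2 then r2 ++ [w] else r2) r = r ++ ext ∧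
      ∀ x ∈ ext, x ∈ l := by
  induction l generalizing r with
  | nil => exact ⟨[], by simp, by simp⟩
  | cons w l IH =>
    simp only [List.foldl_cons]
    by_cases h : w ≠ original ∧ w ∉ r
    · obtain ⟨ext, he, hm⟩ := IH (r ++ [w])
      rw [if_pos h]
      exact ⟨w :: ext, by rw [he]; simp, by
        intro x hx
        rcases List.mem_cons.1 hx with hx | hx
        · simp [hx]
        · exact List.mem_cons_of_mem _ (hm x hx)⟩
    · obtain ⟨ext, he, hm⟩ := IH r
      rw [if_neg h]
      exact ⟨ext, he, fun x hx => List.mem_cons_of_mem _ (hm x hx)⟩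

theorem nodup_innerF (original : String) (l r : List String) (h : r.Nodup) :
    (l.foldl (fun r2 w => if w ≠ original ∧ w ∉ r2 then r2 ++ [w] else r2) r).Nodup := by
  induction l generalizing r with
  | nil => simpa using h
  | cons w l IH =>
    simp only [List.foldl_cons]
    by_cases hc : w ≠ original ∧ w ∉ r
    · rw [if_pos hc]
      refine IH _ ?_
      rw [List.nodup_append]
      refine ⟨h, List.nodup_singleton w, ?_⟩
      intro a ha b hb
      simp only [List.mem_singleton] at hb
      subst hb
      intro hab
      exact hc.2 (hab ▸ ha)
    · rw [if_neg hc]; exact IH _ h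

theorem mem_outerF (dd : PySem.Dict String (List String)) (original : String)
    (snap r : List String) (x : String) :
    x ∈ snap.foldl (fun r u =>
        (dd.getD u []).foldl (fun r2 w => if w ≠ original ∧ w ∉ r2 then r2 ++ [w] else r2) r) r ↔
      x ∈ r ∨ ∃ u ∈ snap, x ∈ succs dd original u := by
  induction snap generalizing r with
  | nil => simp
  | cons u snap IH =>
    simp only [List.foldl_cons]
    rw [IH, mem_innerF]
    have hs : x ∈ succs dd original u ↔ (x ∈ dd.getD u [] ∧ x ≠ original) := by
      simp [succs, List.mem_filter]
    simp only [List.mem_cons]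
    constructor
    · rintro ((hr | hl) | ⟨v, hv, hx⟩)
      · exact Or.inl hr
      · exact Or.inr ⟨u, Or.inl rfl, hs.2 hl⟩
      · exact Or.inr ⟨v, Or.inr hv, hx⟩
    · rintro (hr | ⟨v, (rfl | hv), hx⟩)
      · exact Or.inl (Or.inl hr)
      · exact Or.inl (Or.inr (hs.1 hx))
      · exact Or.inr ⟨v, hv, hx⟩

theorem mem_bRound (dd : PySem.Dict String (List String)) (original : String) (r : List String) (x : String) :
    x ∈ bRound dd original r ↔ x ∈ r ∨ ∃ u ∈ r, x ∈ succs dd original u := by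
  simp only [bRound]
  exact mem_outerF dd original r r x

theorem getD_subset_flatten (dd : PySem.Dict String (List String)) (u x : String)
    (h : x ∈ dd.getD u []) : x ∈ dd.values.flatten := by
  simp only [PySem.Dict.getD, PySem.Dict.get?] at h
  cases hf : List.find? (fun p => p.1 == u) dd.items with
  | none => rw [hf] at h; simp at h
  | some p =>
    rw [hf] at h
    simp only [Option.map_some, Option.getD_some] at h
    have hmem := List.mem_of_find?_eq_some hf
    exact List.mem_flatten.2 ⟨p.2, List.mem_map_of_mem hmem, h⟩

theorem bRound_prefix (dd : PySem.Dict String (List String)) (original : String) (r : List String) :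
    ∃ ext, bRound dd original r = r ++ ext ∧ ∀ x ∈ ext, x ∈ dd.values.flatten := by
  suffices h : ∀ snap acc : List String, ∃ ext,
      snap.foldl (fun r u =>
        (dd.getD u []).foldl (fun r2 w => if w ≠ original ∧ w ∉ r2 then r2 ++ [w] else r2) r) acc
        = acc ++ ext ∧ ∀ x ∈ ext, x ∈ dd.values.flatten by
    simpa only [bRound] using h r r
  intro snap
  induction snap with
  | nil => exact fun acc => ⟨[], by simp, by simp⟩
  | cons u snap IH =>
    intro acc
    simp only [List.foldl_cons]
    obtain ⟨e1, he1, hm1⟩ := innerF_prefix original (dd.getD u []) acc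
    rw [he1]
    obtain ⟨e2, he2, hm2⟩ := IH (acc ++ e1)
    refine ⟨e1 ++ e2, by rw [he2]; simp, ?_⟩
    intro x hx
    rcases List.mem_append.1 hx with hx | hx
    · exact getD_subset_flatten dd u x (hm1 x hx)
    · exact hm2 x hx

theorem nodup_bRound (dd : PySem.Dict String (List String)) (original : String) (r : List String)
    (h : r.Nodup) : (bRound dd original r).Nodup := by
  suffices haux : ∀ snap acc : List String, acc.Nodup →
      (snap.foldl (fun r u =>
        (dd.getD u []).foldl (fun r2 w => if w ≠ original ∧ w ∉ r2 then r2 ++ [w] else r2) r) acc).Nodup by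
    simpa only [bRound] using haux r r h
  intro snap
  induction snap with
  | nil => exact fun acc ha => ha
  | cons u snap IH =>
    intro acc ha
    simp only [List.foldl_cons]
    exact IH _ (nodup_innerF original _ _ ha)

theorem bIter_fix (dd : PySem.Dict String (List String)) (original : String) (n : Nat)
    (r : List String) (h : bRound dd original r = r) : bIter dd original n r = r := by
  induction n with
  | zero => rfl
  | succ n IH => simp only [bIter]; rw [h]; exact IH

theorem subset_bIter (dd : PySem.Dict String (List String)) (original : String) (n : Nat)
    (r : List String) : ∃ ext, bIter dd original n r = r ++ ext ∧ ∀ x ∈ ext, x ∈ dd.values.flatten := by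
  induction n generalizing r with
  | zero => exact ⟨[], by simp [bIter], by simp⟩
  | succ n IH =>
    obtain ⟨e1, he1, hm1⟩ := bRound_prefix dd original r
    obtain ⟨e2, he2, hm2⟩ := IH (r ++ e1)
    refine ⟨e1 ++ e2, ?_, ?_⟩
    · show bIter dd original n (bRound dd original r) = _
      rw [he1, he2, List.append_assoc]
    · intro x hx
      rcases List.mem_append.1 hx with hx | hx
      · exact hm1 x hx
      · exact hm2 x hx

theorem nodup_bIter (dd : PySem.Dict String (List String)) (original : String) (n : Nat)
    (r : List String) (h : r.Nodup) : (bIter dd original n r).Nodup := by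
  induction n generalizing r with
  | zero => simpa [bIter] using h
  | succ n IH => simp only [bIter]; exact IH _ (nodup_bRound dd original r h)

theorem bIter_growth (dd : PySem.Dict String (List String)) (original : String) (n : Nat)
    (r : List String) :
    bRound dd original (bIter dd original n r) = bIter dd original n r ∨
      r.length + n ≤ (bIter dd original n r).length := by
  induction n generalizing r with
  | zero => right; simp [bIter]
  | succ n IH =>
    by_cases hf : bRound dd original r = r
    · left
      rw [show bIter dd original (n+1) r = bIter dd original n (bRound dd original r) from rfl, hf,
        bIter_fix dd original n r hf, hf]
    · obtain ⟨e, he, _⟩ := bRound_prefix dd original r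
      have hne : e ≠ [] := by rintro rfl; exact hf (by simpa using he)
      have hlen : r.length + 1 ≤ (bRound dd original r).length := by
        rw [he, List.length_append]
        have := List.length_pos_of_ne_nil hne
        omega
      rcases IH (bRound dd original r) with h | h
      · left; exact h
      · right
        have : bIter dd original (n+1) r = bIter dd original n (bRound dd original r) := rfl
        rw [this]
        omega

theorem bIter_fixpoint (dd : PySem.Dict String (List String)) (original : String)
    (r : List String) (h : r.Nodup) :
    bRound dd original (bIter dd original ((dd.values.map List.length).sum + 1) r) =
      bIter dd original ((dd.values.map List.length).sum + 1) r := by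
  set n := (dd.values.map List.length).sum + 1 with hn
  rcases bIter_growth dd original n r with hfix | hgrow
  · exact hfix
  · exfalso
    obtain ⟨ext, he, hm⟩ := subset_bIter dd original n r
    have hnd : (bIter dd original n r).Nodup := nodup_bIter dd original n r h
    have hsub : bIter dd original n r ⊆ r ++ dd.values.flatten := by
      rw [he]
      intro x hx
      rcases List.mem_append.1 hx with hx | hx
      · exact List.mem_append.2 (Or.inl hx)
      · exact List.mem_append.2 (Or.inr (hm x hx))
    have hle : (bIter dd original n r).length ≤ r.length + (dd.values.map List.length).sum := by
      have := (List.subperm_of_subset hnd hsub).length_le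
      simpa [List.length_flatten] using this
    omega

theorem path_zero (dd : PySem.Dict String (List String)) (original : String) (u w : String) :
    RPath dd original 0 u w ↔ u = w := by
  constructor
  · rintro ⟨l, hl, _, hlast⟩
    rw [List.length_eq_zero_iff] at hl
    subst hl
    simpa using hlast
  · rintro rfl
    exact ⟨[], rfl, trivial, rfl⟩

theorem path_front (dd : PySem.Dict String (List String)) (original : String) (n : Nat) (u w : String) :
    RPath dd original (n+1) u w ↔ ∃ v ∈ succs dd original u, RPath dd original n v w := by
  constructor
  · rintro ⟨l, hl, hch, hlast⟩
    cases l with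
    | nil => simp at hl
    | cons v l =>
      obtain ⟨hv, hch'⟩ := hch
      refine ⟨v, hv, l, by simpa using hl, hch', ?_⟩
      rw [List.getLastD_cons] at hlast
      exact hlast
  · rintro ⟨v, hv, l, hl, hch, hlast⟩
    exact ⟨v :: l, by simp [hl], ⟨hv, hch⟩, by rw [List.getLastD_cons]; exact hlast⟩

theorem chain_append (dd : PySem.Dict String (List String)) (original : String) (l : List String)
    (u x : String) (h : chainFrom dd original u l) (hx : x ∈ succs dd original (l.getLastD u)) :
    chainFrom dd original u (l ++ [x]) := by
  induction l generalizing u with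
  | nil => exact ⟨by simpa using hx, trivial⟩
  | cons v l IH =>
    obtain ⟨hv, hch⟩ := h
    rw [List.getLastD_cons] at hx
    exact ⟨hv, IH v hch hx⟩

theorem path_snoc (dd : PySem.Dict String (List String)) (original : String) (n : Nat) (u w x : String)
    (h : RPath dd original n u w) (hx : x ∈ succs dd original w) : RPath dd original (n+1) u x := by
  obtain ⟨l, hl, hch, hlast⟩ := h
  refine ⟨l ++ [x], by simp [hl], chain_append dd original l u x hch (by rw [hlast]; exact hx), ?_⟩
  simp

theorem mem_bIter_iff (dd : PySem.Dict String (List String)) (original : String) (n : Nat)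
    (seed : List String) (x : String) :
    x ∈ bIter dd original n seed ↔ ∃ u ∈ seed, ∃ m ≤ n, RPath dd original m u x := by
  induction n generalizing seed with
  | zero =>
    simp only [bIter]
    constructor
    · intro hx; exact ⟨x, hx, 0, le_refl 0, (path_zero dd original x x).2 rfl⟩
    · rintro ⟨u, hu, m, hm, hp⟩
      interval_cases m
      rw [path_zero] at hp
      subst hp; exact hu
  | succ n IH =>
    rw [show bIter dd original (n+1) seed = bIter dd original n (bRound dd original seed) from rfl, IH]
    constructor
    · rintro ⟨u, hu, m, hm, hp⟩
      rcases (mem_bRound dd original seed u).1 hu with hu' | ⟨u0, hu0, hsucc⟩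
      · exact ⟨u, hu', m, Nat.le_succ_of_le hm, hp⟩
      · exact ⟨u0, hu0, m+1, Nat.succ_le_succ hm,
          (path_front dd original m u0 x).2 ⟨u, hsucc, hp⟩⟩
    · rintro ⟨u, hu, m, hm, hp⟩
      cases m with
      | zero =>
        rw [path_zero] at hp
        subst hp
        exact ⟨u, (mem_bRound dd original seed u).2 (Or.inl hu), 0, Nat.zero_le n,
          (path_zero dd original u u).2 rfl⟩
      | succ m' =>
        obtain ⟨v, hv, hp'⟩ := (path_front dd original m' u x).1 hp
        exact ⟨v, (mem_bRound dd original seed v).2 (Or.inr ⟨u, hu, hv⟩), m',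
          Nat.le_of_succ_le_succ hm, hp'⟩

theorem closed_path (dd : PySem.Dict String (List String)) (original : String) (S : List String)
    (hS : bRound dd original S = S) (m : Nat) (u x : String)
    (hu : u ∈ S) (hp : RPath dd original m u x) : x ∈ S := by
  induction m generalizing u with
  | zero => rw [path_zero] at hp; subst hp; exact hu
  | succ m IH =>
    obtain ⟨v, hv, hp'⟩ := (path_front dd original m u x).1 hp
    have : v ∈ S := by
      rw [← hS]
      exact (mem_bRound dd original S v).2 (Or.inr ⟨u, hu, hv⟩)
    exact IH v this hp'

theorem chain_pool (dd : PySem.Dict String (List String)) (original : String) (l : List String)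
    (u : String) (h : chainFrom dd original u l) : ∀ x ∈ l, x ∈ dd.values.flatten := by
  induction l generalizing u with
  | nil => simp
  | cons v l IH =>
    obtain ⟨hv, hch⟩ := h
    intro x hx
    rcases List.mem_cons.1 hx with rfl | hx
    · exact getD_subset_flatten dd u x (List.mem_of_mem_filter hv)
    · exact IH v hch x hx

theorem mem_chain_path (dd : PySem.Dict String (List String)) (original : String) (l : List String)
    (u x : String) (h : chainFrom dd original u l) (hx : x ∈ l) :
    ∃ j, 1 ≤ j ∧ RPath dd original j u x := by
  induction l generalizing u with
  | nil => simp at hx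
  | cons v l IH =>
    obtain ⟨hv, hch⟩ := h
    rcases List.mem_cons.1 hx with rfl | hx
    · exact ⟨1, le_refl 1, (path_front dd original 0 u x).2 ⟨x, hv, (path_zero dd original x x).2 rfl⟩⟩
    · obtain ⟨j, hj, hp⟩ := IH v hch hx
      exact ⟨j+1, by omega, (path_front dd original j u x).2 ⟨v, hv, hp⟩⟩

theorem chain_cycle (dd : PySem.Dict String (List String)) (original : String) (l : List String)
    (u : String) (h : chainFrom dd original u l) (hnd : ¬ (u :: l).Nodup) :
    ∃ a i j, RPath dd original i u a ∧ 1 ≤ j ∧ RPath dd original j a a := by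
  induction l generalizing u with
  | nil => simp at hnd
  | cons v l IH =>
    obtain ⟨hv, hch⟩ := h
    by_cases hu : u ∈ v :: l
    · obtain ⟨j, hj, hp⟩ := mem_chain_path dd original (v :: l) u u ⟨hv, hch⟩ hu
      exact ⟨u, 0, j, (path_zero dd original u u).2 rfl, hj, hp⟩
    · have hnd' : ¬ (v :: l).Nodup := by
        intro hcon
        exact hnd (List.nodup_cons.2 ⟨hu, hcon⟩)
      obtain ⟨a, i, j, hpa, hj, hpc⟩ := IH v hch hnd'
      exact ⟨a, i+1, j, (path_front dd original i u a).2 ⟨v, hv, hpa⟩, hj, hpc⟩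

theorem succs_length_lt (dd : PySem.Dict String (List String)) (original u : String) :
    (succs dd original u).length < (dd.values.map List.length).foldl max 0 + 2 := by
  have h1 : (succs dd original u).length ≤ (dd.getD u []).length := by
    unfold succs
    exact List.length_filter_le _ _
  cases hf : List.find? (fun p => p.1 == u) dd.items with
  | none =>
    have hnil : dd.getD u [] = [] := by simp [PySem.Dict.getD, PySem.Dict.get?, hf]
    rw [hnil] at h1
    simp only [List.length_nil, Nat.le_zero] at h1
    omega
  | some p =>
    have hget : dd.getD u [] = p.2 := by simp [PySem.Dict.getD, PySem.Dict.get?, hf]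
    have hmem : p.2.length ∈ (dd.values.map List.length) :=
      List.mem_map_of_mem (List.mem_map_of_mem (List.mem_of_find?_eq_some hf))
    have h2 : p.2.length ≤ (dd.values.map List.length).foldl max 0 :=
      (PySem.List.le_foldl_max (dd.values.map List.length) 0).2 _ hmem
    rw [hget] at h1
    omega

theorem pushed_eq_succs (dd : PySem.Dict String (List String)) (original q0 : String) :
    (if dd.contains q0 then (dd.getD q0 []).filter (fun v => v ≠ original) else []) =
      succs dd original q0 := by
  by_cases hc : dd.contains q0 = true
  · rw [if_pos hc]; rfl
  · rw [if_neg hc]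
    have hfind : List.find? (fun p => p.1 == q0) dd.items = none := by
      rw [List.find?_eq_none]
      intro p hp hpq
      exact hc (List.any_eq_true.2 ⟨p, hp, hpq⟩)
    simp [succs, PySem.Dict.getD, PySem.Dict.get?, hfind]

theorem takeWhile_append_cases (p : (String × Nat) → Bool) (l1 l2 : List (String × Nat)) :
    (l1 ++ l2).takeWhile p = l1.takeWhile p ∨
      (l1.takeWhile p = l1 ∧ (l1 ++ l2).takeWhile p = l1 ++ l2.takeWhile p) := by
  induction l1 with
  | nil => right; exact ⟨rfl, rfl⟩
  | cons a l1 IH =>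
    by_cases hp : p a = true
    · rcases IH with h | ⟨h1, h2⟩
      · left; simp [hp, h]
      · right
        constructor
        · simp [hp, h1]
        · simp [hp, h2]
    · left
      simp [hp]

-- case tc reachable: the loop returns false, within any fuel exceeding the potential
theorem loopFalse (dd : PySem.Dict String (List String)) (tc original : String) (B K : Nat)
    (hB : ∀ u, (succs dd original u).length < B)
    (fuel : Nat) (Q : List (String × Nat)) (m : Nat)
    (hlev : ∃ Q1 Q2, Q = Q1 ++ Q2 ∧ (∀ e ∈ Q1, e.2 = m) ∧ (∀ e ∈ Q2, e.2 = m + 1))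
    (hwit : ∃ e ∈ Q, ∃ j, RPath dd original j e.1 tc ∧ e.2 + j ≤ K)
    (hfuel : ((Q.takeWhile (fun e => e.1 != tc)).map (fun e => B ^ (K + 1 - e.2))).sum < fuel) :
    checkLoop dd tc original fuel (Q.map Prod.fst) = false := by
  induction fuel generalizing Q m with
  | zero => exact absurd hfuel (Nat.not_lt_zero _)
  | succ fuel IH =>
    obtain ⟨e0, he0, j0, hpj0, hle0⟩ := hwit
    cases Q with
    | nil => simp at he0
    | cons e Q' =>
      obtain ⟨u, dh⟩ := e
      by_cases hu : u = tc
      · simp only [List.map_cons, checkLoop]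
        rw [if_pos hu]
      · obtain ⟨Q1, Q2, hQ, h1, h2⟩ := hlev
        have hwK : e0.2 ≤ K := by omega
        -- the head depth is at most K
        have hdh : dh ≤ K := by
          cases Q1 with
          | nil =>
            have hQ2 : Q2 = (u, dh) :: Q' := by simpa using hQ.symm
            have hdh2 := h2 (u, dh) (by rw [hQ2]; exact List.mem_cons_self)
            have he0' : e0 ∈ Q2 := by rw [hQ2]; exact he0
            have := h2 e0 he0'
            simp only at hdh2
            omega
          | cons a Q1' =>
            have hQp : (u, dh) = a ∧ Q' = Q1' ++ Q2 := by
              simp only [List.cons_append, List.cons.injEq] at hQ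
              exact hQ
            have hdh1 : dh = m := by
              have := h1 a List.mem_cons_self
              rw [← hQp.1] at this
              exact this
            have he0' : e0 ∈ (a :: Q1') ++ Q2 := by rw [← hQ]; exact he0
            rcases List.mem_append.1 he0' with hin | hin
            · have := h1 e0 hin; omega
            · have := h2 e0 hin; omega
        -- unfold one loop step
        have hstep : checkLoop dd tc original (fuel+1) (((u, dh) :: Q').map Prod.fst) =
            checkLoop dd tc original fuel
              ((Q' ++ (succs dd original u).map (fun v => (v, dh+1))).map Prod.fst) := by
          simp only [List.map_cons, checkLoop]
          rw [if_neg hu, pushed_eq_succs dd original u]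
          congr 1
          simp [List.map_map, Function.comp_def]
        rw [hstep]
        -- new level structure
        have hlev' : ∃ m' Q1' Q2',
            Q' ++ (succs dd original u).map (fun v => (v, dh+1)) = Q1' ++ Q2' ∧
            (∀ e ∈ Q1', e.2 = m') ∧ (∀ e ∈ Q2', e.2 = m' + 1) := by
          cases Q1 with
          | nil =>
            have hQ2 : Q2 = (u, dh) :: Q' := by simpa using hQ.symm
            have hdh2 : dh = m + 1 := h2 (u, dh) (by rw [hQ2]; exact List.mem_cons_self)
            refine ⟨m + 1, Q', (succs dd original u).map (fun v => (v, dh+1)), rfl, ?_, ?_⟩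
            · intro e he
              exact h2 e (by rw [hQ2]; exact List.mem_cons_of_mem _ he)
            · intro e he
              obtain ⟨v, _, rfl⟩ := List.mem_map.1 he
              simp [hdh2]
          | cons a Q1' =>
            have hQ' : (u, dh) = a ∧ Q' = Q1' ++ Q2 := by
              simp only [List.cons_append, List.cons.injEq] at hQ
              exact hQ
            have hdh1 : dh = m := by
              have := h1 a List.mem_cons_self
              rw [← hQ'.1] at this
              exact this
            refine ⟨m, Q1', Q2 ++ (succs dd original u).map (fun v => (v, dh+1)),
              by rw [hQ'.2, List.append_assoc], ?_, ?_⟩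
            · exact fun e he => h1 e (List.mem_cons_of_mem _ he)
            · intro e he
              rcases List.mem_append.1 he with he | he
              · exact h2 e he
              · obtain ⟨v, _, rfl⟩ := List.mem_map.1 he
                simp [hdh1]
        -- new witness
        have hwit' : ∃ e ∈ Q' ++ (succs dd original u).map (fun v => (v, dh+1)),
            ∃ j, RPath dd original j e.1 tc ∧ e.2 + j ≤ K := by
          rcases List.mem_cons.1 he0 with rfl | hin
          · cases j0 with
            | zero =>
              rw [path_zero] at hpj0
              exact absurd hpj0 hu
            | succ j' =>
              obtain ⟨v, hv, hpv⟩ := (path_front dd original j' u tc).1 hpj0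
              refine ⟨(v, dh+1), List.mem_append.2 (Or.inr (List.mem_map_of_mem hv)), j', hpv, ?_⟩
              simp only at hle0 ⊢
              omega
          · exact ⟨e0, List.mem_append.2 (Or.inl hin), j0, hpj0, hle0⟩
        obtain ⟨m', Q1n, Q2n, hQn, h1n, h2n⟩ := hlev'
        refine IH _ m' ⟨Q1n, Q2n, hQn, h1n, h2n⟩ hwit' ?_
        -- potential decreases
        have hPtrue : ((fun e => e.1 != tc) ((u, dh) : String × Nat)) = true := by
          simpa using hu
        have hsum : ((((u, dh) :: Q').takeWhile (fun e => e.1 != tc)).map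
            (fun e => B ^ (K + 1 - e.2))).sum
            = B ^ (K + 1 - dh) +
              ((Q'.takeWhile (fun e => e.1 != tc)).map (fun e => B ^ (K + 1 - e.2))).sum := by
          rw [List.takeWhile_cons, if_pos hPtrue]
          simp
        rw [hsum] at hfuel
        have hBpos : 0 < B := lt_of_le_of_lt (Nat.zero_le _) (hB u)
        have hexp : K + 1 - dh = (K - dh) + 1 := by omega
        rcases takeWhile_append_cases (fun e => e.1 != tc) Q'
            ((succs dd original u).map (fun v => (v, dh+1))) with hcase | ⟨htw, hcase⟩
        · rw [hcase]
          have hppos : 0 < B ^ (K + 1 - dh) := Nat.pow_pos hBpos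
          omega
        · rw [hcase]
          have hsum2 : ((Q' ++ ((succs dd original u).map (fun v => (v, dh+1))).takeWhile
              (fun e => e.1 != tc)).map (fun e => B ^ (K + 1 - e.2))).sum
              = (Q'.map (fun e => B ^ (K + 1 - e.2))).sum +
                ((((succs dd original u).map (fun v => (v, dh+1))).takeWhile
                  (fun e => e.1 != tc)).map (fun e => B ^ (K + 1 - e.2))).sum := by
            rw [List.map_append, List.sum_append]
          rw [hsum2]
          have htwQ' : ((Q'.takeWhile (fun e => e.1 != tc)).map
              (fun e => B ^ (K + 1 - e.2))).sum = (Q'.map (fun e => B ^ (K + 1 - e.2))).sum := by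
            rw [htw]
          have hsub : List.Sublist (((succs dd original u).map (fun v => (v, dh+1))).takeWhile
              (fun e => e.1 != tc)) ((succs dd original u).map (fun v => (v, dh+1))) :=
            List.takeWhile_sublist _
          have hlen : ((((succs dd original u).map (fun v => (v, dh+1))).takeWhile
              (fun e => e.1 != tc))).length ≤ (succs dd original u).length := by
            have := hsub.length_le
            simpa using this
          have hbnd : (((((succs dd original u).map (fun v => (v, dh+1))).takeWhile
              (fun e => e.1 != tc))).map (fun e => B ^ (K + 1 - e.2))).sum
              ≤ (succs dd original u).length * B ^ (K - dh) := by
            have hall : ∀ x ∈ (((((succs dd original u).map (fun v => (v, dh+1))).takeWhile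
                (fun e => e.1 != tc))).map (fun e => B ^ (K + 1 - e.2))), x ≤ B ^ (K - dh) := by
              intro x hx
              obtain ⟨e, he, rfl⟩ := List.mem_map.1 hx
              have hme : e ∈ (succs dd original u).map (fun v => (v, dh+1)) := hsub.subset he
              obtain ⟨v, _, rfl⟩ := List.mem_map.1 hme
              have hee : K + 1 - (dh + 1) = K - dh := by omega
              simp [hee]
            calc (((((succs dd original u).map (fun v => (v, dh+1))).takeWhile
                (fun e => e.1 != tc))).map (fun e => B ^ (K + 1 - e.2))).sum
                ≤ (((((succs dd original u).map (fun v => (v, dh+1))).takeWhile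
                  (fun e => e.1 != tc))).map (fun e => B ^ (K + 1 - e.2))).length * B ^ (K - dh) := by
                  have := List.sum_le_card_nsmul _ _ hall
                  simpa [smul_eq_mul] using this
              _ ≤ (succs dd original u).length * B ^ (K - dh) := by
                  have hl2 : (((((succs dd original u).map (fun v => (v, dh+1))).takeWhile
                    (fun e => e.1 != tc))).map (fun e => B ^ (K + 1 - e.2))).length
                    ≤ (succs dd original u).length := by simpa using hlen
                  exact Nat.mul_le_mul_right _ hl2
          have hlt : (succs dd original u).length * B ^ (K - dh) < B ^ (K + 1 - dh) := by
            rw [hexp, pow_succ]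
            have hp : 0 < B ^ (K - dh) := Nat.pow_pos hBpos
            calc (succs dd original u).length * B ^ (K - dh)
                < B * B ^ (K - dh) := Nat.mul_lt_mul_of_lt_of_le (hB u) (le_refl _) hp
              _ = B ^ (K - dh) * B := Nat.mul_comm _ _
          omega

-- case tc unreachable, no reachable cycle: the loop drains the queue and returns true
theorem loopTrue (dd : PySem.Dict String (List String)) (tc original oc : String) (B bound : Nat)
    (hB : ∀ u, (succs dd original u).length < B)
    (hdepth : ∀ dp u, RPath dd original dp oc u → dp < bound)
    (htc : ∀ j, ¬ RPath dd original j oc tc)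
    (fuel : Nat) (Q : List (String × Nat))
    (hpath : ∀ e ∈ Q, RPath dd original e.2 oc e.1)
    (hfuel : (Q.map (fun e => B ^ (bound + 1 - e.2))).sum < fuel) :
    checkLoop dd tc original fuel (Q.map Prod.fst) = true := by
  induction fuel generalizing Q with
  | zero => exact absurd hfuel (Nat.not_lt_zero _)
  | succ fuel IH =>
    cases Q with
    | nil => rfl
    | cons e Q' =>
      obtain ⟨u, dh⟩ := e
      have hpu : RPath dd original dh oc u := hpath (u, dh) List.mem_cons_self
      have hu : u ≠ tc := fun h => htc dh (h ▸ hpu)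
      have hstep : checkLoop dd tc original (fuel+1) (((u, dh) :: Q').map Prod.fst) =
          checkLoop dd tc original fuel
            ((Q' ++ (succs dd original u).map (fun v => (v, dh+1))).map Prod.fst) := by
        simp only [List.map_cons, checkLoop]
        rw [if_neg hu, pushed_eq_succs dd original u]
        congr 1
        simp [List.map_map, Function.comp_def]
      rw [hstep]
      refine IH _ ?_ ?_
      · intro e he
        rcases List.mem_append.1 he with he | he
        · exact hpath e (List.mem_cons_of_mem _ he)
        · obtain ⟨v, hv, rfl⟩ := List.mem_map.1 he
          exact path_snoc dd original dh oc u v hpu hv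
      · have hdp : dh < bound := hdepth dh u hpu
        have hBpos : 0 < B := lt_of_le_of_lt (Nat.zero_le _) (hB u)
        have hexp : bound + 1 - dh = (bound - dh) + 1 := by omega
        have hexp2 : bound + 1 - (dh + 1) = bound - dh := by omega
        have hsumnew : (((succs dd original u).map (fun v => (v, dh+1))).map
            (fun e => B ^ (bound + 1 - e.2))).sum = (succs dd original u).length * B ^ (bound - dh) := by
          rw [List.map_map]
          have : ((fun e : String × Nat => B ^ (bound + 1 - e.2)) ∘ (fun v => (v, dh+1)))
              = fun _ => B ^ (bound - dh) := by
            funext v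
            simp [hexp2]
          rw [this, List.map_const', List.sum_replicate, smul_eq_mul]
        have hlt : (succs dd original u).length * B ^ (bound - dh) < B ^ (bound + 1 - dh) := by
          rw [hexp, pow_succ]
          have hp : 0 < B ^ (bound - dh) := Nat.pow_pos hBpos
          calc (succs dd original u).length * B ^ (bound - dh)
              < B * B ^ (bound - dh) := Nat.mul_lt_mul_of_lt_of_le (hB u) (le_refl _) hp
            _ = B ^ (bound - dh) * B := Nat.mul_comm _ _
        have hs1 : ((((u, dh) :: Q').map (fun e => B ^ (bound + 1 - e.2))).sum)
            = B ^ (bound + 1 - dh) + (Q'.map (fun e => B ^ (bound + 1 - e.2))).sum := by simp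
        have hs2 : (((Q' ++ (succs dd original u).map (fun v => (v, dh+1)))).map
            (fun e => B ^ (bound + 1 - e.2))).sum
            = (Q'.map (fun e => B ^ (bound + 1 - e.2))).sum +
              (succs dd original u).length * B ^ (bound - dh) := by
          rw [List.map_append, List.sum_append, hsumnew]
        rw [hs1] at hfuel
        rw [hs2]
        omega

-- characterisation of the bIter closure used by Pre_check
theorem closure_char (dd : PySem.Dict String (List String)) (original oc : String) (x : String) :
    x ∈ bIter dd original ((dd.values.map List.length).sum + 1) [oc] ↔
      ∃ n, RPath dd original n oc x := by
  set bound := ((dd.values.map List.length).sum + 1) with hbound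
  have hfix : bRound dd original (bIter dd original bound [oc]) = bIter dd original bound [oc] := by
    have h := bIter_fixpoint dd original [oc] (List.nodup_singleton oc)
    rw [← hbound] at h
    exact h
  have hocS : oc ∈ bIter dd original bound [oc] := by
    obtain ⟨ext, he, _⟩ := subset_bIter dd original bound [oc]
    rw [he]
    exact List.mem_append.2 (Or.inl List.mem_cons_self)
  constructor
  · intro hx
    obtain ⟨u, hu, mm, hmm, hp⟩ := (mem_bIter_iff dd original bound [oc] x).1 hx
    have huoc : u = oc := by simpa using hu
    subst huoc
    exact ⟨mm, hp⟩
  · rintro ⟨nn, hp⟩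
    exact closed_path dd original _ hfix nn oc x hocS hp

theorem main_eq (d : List (String × List String)) (oc tc original : String)
    (hpre : Pre_check d oc tc original) :
    checkLoop (PySem.Dict.ofList d) tc original (checkFuel (PySem.Dict.ofList d)) [oc]
      = !(bIter (PySem.Dict.ofList d) original
          (((PySem.Dict.ofList d).values.map List.length).sum + 1) [oc]).contains tc := by
  unfold Pre_check at hpre
  set dd := PySem.Dict.ofList d with hdd
  set bound := ((dd.values.map List.length).sum + 1) with hbound
  set B := ((dd.values.map List.length).foldl max 0 + 2) with hBdef
  have hclose : closeL d original [oc] = bIter dd original bound [oc] := by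
    unfold closeL
    rfl
  rw [hclose] at hpre
  have hfix : bRound dd original (bIter dd original bound [oc]) = bIter dd original bound [oc] := by
    have h := bIter_fixpoint dd original [oc] (List.nodup_singleton oc)
    rw [← hbound] at h
    exact h
  have hocS : oc ∈ bIter dd original bound [oc] := by
    obtain ⟨ext, he, _⟩ := subset_bIter dd original bound [oc]
    rw [he]
    exact List.mem_append.2 (Or.inl List.mem_cons_self)
  have hchar : ∀ x, x ∈ bIter dd original bound [oc] ↔ ∃ nn, RPath dd original nn oc x := by
    intro x
    rw [hbound]
    exact closure_char dd original oc x
  have hBlt : ∀ u, (succs dd original u).length < B := by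
    intro u
    have h := succs_length_lt dd original u
    rw [← hBdef] at h
    exact h
  have hfuel_eq : checkFuel dd = B ^ (bound + 2) := by
    unfold checkFuel
    rw [← hBdef]
  have hBtwo : 1 < B := by omega
  by_cases htc : tc ∈ bIter dd original bound [oc]
  · -- tc reachable: both sides are false
    have hcont : (bIter dd original bound [oc]).contains tc = true :=
      List.elem_eq_true_of_mem htc
    obtain ⟨u, hu, K, hKb, hp⟩ := (mem_bIter_iff dd original bound [oc] tc).1 htc
    have huoc : u = oc := by simpa using hu
    have hpoc : RPath dd original K oc tc := by rw [← huoc]; exact hp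
    have hfalse : checkLoop dd tc original (checkFuel dd) [oc] = false := by
      have hmap : ([oc] : List String) = ([((oc : String), (0 : Nat))]).map Prod.fst := by simp
      rw [hmap]
      refine loopFalse dd tc original B K hBlt (checkFuel dd) [(oc, 0)] 0
        ⟨[(oc, 0)], [], by simp, by simp, by simp⟩
        ⟨(oc, 0), List.mem_cons_self, K, hpoc, by simp⟩ ?_
      rw [hfuel_eq]
      have h1 : ((([((oc : String), (0 : Nat))]).takeWhile (fun e => e.1 != tc)).map
          (fun e => B ^ (K + 1 - e.2))).sum ≤ B ^ (K + 1) := by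
        rw [List.takeWhile_cons]
        cases hb : (((oc, 0) : String × Nat).1 != tc)
        · simp
        · simp
      have h2 : B ^ (K + 1) < B ^ (bound + 2) := Nat.pow_lt_pow_right hBtwo (by omega)
      omega
    rw [hfalse, hcont]
    rfl
  · -- tc unreachable: Pre gives acyclicity, both sides are true
    have hacyc : ∀ u ∈ bIter dd original bound [oc],
        u ∉ closeL d original (succs dd original u) := by
      rcases hpre with hl | hr
      · exact absurd hl htc
      · exact hr
    have hdepth : ∀ dp u, RPath dd original dp oc u → dp < bound := by
      intro dp u hp
      by_contra hge
      have hge' : bound ≤ dp := Nat.le_of_not_lt hge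
      obtain ⟨l, hl, hch, hlast⟩ := hp
      have hsubpool : (oc :: l) ⊆ oc :: dd.values.flatten := by
        intro x hx
        rcases List.mem_cons.1 hx with rfl | hx
        · exact List.mem_cons_self
        · exact List.mem_cons_of_mem _ (chain_pool dd original l oc hch x hx)
      have hnodup : ¬ (oc :: l).Nodup := by
        intro hnd
        have hle := (List.subperm_of_subset hnd hsubpool).length_le
        simp only [List.length_cons, List.length_flatten] at hle
        omega
      obtain ⟨a, i, j, hpa, hj1, hpc⟩ := chain_cycle dd original l oc hch hnodup
      have haS : a ∈ bIter dd original bound [oc] := (hchar a).2 ⟨i, hpa⟩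
      have haC : a ∈ closeL d original (succs dd original a) := by
        cases j with
        | zero => omega
        | succ j' =>
          obtain ⟨v, hv, hpv⟩ := (path_front dd original j' a a).1 hpc
          show a ∈ bIter dd original bound (PySem.List.dedup (succs dd original a))
          have hnd : (PySem.List.dedup (succs dd original a)).Nodup := PySem.List.nodup_dedup _
          have hfix2 := bIter_fixpoint dd original (PySem.List.dedup (succs dd original a)) hnd
          rw [← hbound] at hfix2
          have hvin : v ∈ bIter dd original bound (PySem.List.dedup (succs dd original a)) := by
            obtain ⟨ext, he, _⟩ := subset_bIter dd original bound (PySem.List.dedup (succs dd original a))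
            rw [he]
            exact List.mem_append.2 (Or.inl ((PySem.List.mem_dedup _ _).2 hv))
          exact closed_path dd original _ hfix2 j' v a hvin hpv
      exact hacyc a haS haC
    have htc' : ∀ j, ¬ RPath dd original j oc tc := fun j hp => htc ((hchar tc).2 ⟨j, hp⟩)
    have htrue : checkLoop dd tc original (checkFuel dd) [oc] = true := by
      have hmap : ([oc] : List String) = ([((oc : String), (0 : Nat))]).map Prod.fst := by simp
      rw [hmap]
      refine loopTrue dd tc original oc B bound hBlt hdepth htc' (checkFuel dd) [(oc, 0)] ?_ ?_
      · intro e he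
        have he' : e = (oc, 0) := by simpa using he
        subst he'
        exact (path_zero dd original oc oc).2 rfl
      · rw [hfuel_eq]
        simp only [List.map_cons, List.map_nil, List.sum_cons, List.sum_nil, Nat.add_zero,
          Nat.sub_zero]
        exact Nat.pow_lt_pow_right hBtwo (by omega)
    have hcont : (bIter dd original bound [oc]).contains tc = false := by
      cases hcase : (bIter dd original bound [oc]).contains tc
      · rfl
      · exact absurd (List.mem_of_elem_eq_true hcase) htc
    rw [htrue, hcont]
    rfl

-- ===== lemmas about the B port (BFS with a visited set and early exit) =====

theorem mem_pairF_fst (original : String) (l : List String) (p : List String × List String) (x : String) :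
    x ∈ (l.foldl (fun p2 w => if w ≠ original ∧ w ∉ p2.1 then (p2.1 ++ [w], p2.2 ++ [w]) else p2) p).1 ↔
      x ∈ p.1 ∨ (x ∈ l ∧ x ≠ original) := by
  induction l generalizing p with
  | nil => simp
  | cons w l IH =>
    simp only [List.foldl_cons]
    by_cases h : w ≠ original ∧ w ∉ p.1
    · rw [if_pos h, IH]
      simp only [List.mem_append, List.mem_cons]
      constructor
      · rintro ((hr | (rfl | h0)) | ⟨hl, hno⟩)
        · exact Or.inl hr
        · exact Or.inr ⟨Or.inl rfl, h.1⟩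
        · simp at h0
        · exact Or.inr ⟨Or.inr hl, hno⟩
      · rintro (hr | ⟨(rfl | hl), hno⟩)
        · exact Or.inl (Or.inl hr)
        · exact Or.inl (Or.inr (Or.inl rfl))
        · exact Or.inr ⟨hl, hno⟩
    · rw [if_neg h, IH]
      simp only [List.mem_cons]
      constructor
      · rintro (hr | ⟨hl, hno⟩)
        · exact Or.inl hr
        · exact Or.inr ⟨Or.inr hl, hno⟩
      · rintro (hr | ⟨(rfl | hl), hno⟩)
        · exact Or.inl hr
        · rcases not_and_or.mp h with h1 | h1
          · exact absurd (not_not.mp h1) hno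
          · exact Or.inl (not_not.mp h1)
        · exact Or.inr ⟨hl, hno⟩

theorem nodup_pairF_fst (original : String) (l : List String) (p : List String × List String)
    (h : p.1.Nodup) :
    (l.foldl (fun p2 w => if w ≠ original ∧ w ∉ p2.1 then (p2.1 ++ [w], p2.2 ++ [w]) else p2) p).1.Nodup := by
  induction l generalizing p with
  | nil => simpa using h
  | cons w l IH =>
    simp only [List.foldl_cons]
    by_cases hc : w ≠ original ∧ w ∉ p.1
    · rw [if_pos hc]
      refine IH _ ?_
      simp only
      rw [List.nodup_append]
      refine ⟨h, List.nodup_singleton w, ?_⟩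
      intro a ha b hb
      simp only [List.mem_singleton] at hb
      subst hb
      intro hab
      exact hc.2 (hab ▸ ha)
    · rw [if_neg hc]; exact IH _ h

-- the fold appends the SAME new elements to both components
theorem pairF_ext (original : String) (l : List String) (p : List String × List String) :
    ∃ ext,
      (l.foldl (fun p2 w => if w ≠ original ∧ w ∉ p2.1 then (p2.1 ++ [w], p2.2 ++ [w]) else p2) p).1
        = p.1 ++ ext ∧
      (l.foldl (fun p2 w => if w ≠ original ∧ w ∉ p2.1 then (p2.1 ++ [w], p2.2 ++ [w]) else p2) p).2
        = p.2 ++ ext := by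
  induction l generalizing p with
  | nil => exact ⟨[], by simp, by simp⟩
  | cons w l IH =>
    simp only [List.foldl_cons]
    by_cases h : w ≠ original ∧ w ∉ p.1
    · rw [if_pos h]
      obtain ⟨ext, h1, h2⟩ := IH (p.1 ++ [w], p.2 ++ [w])
      exact ⟨w :: ext, by rw [h1]; simp, by rw [h2]; simp⟩
    · rw [if_neg h]
      exact IH p

-- a succs-closed set containing oc contains everything reachable from oc
theorem closedSet_path (dd : PySem.Dict String (List String)) (original : String) (S : List String)
    (hS : ∀ u ∈ S, ∀ v ∈ succs dd original u, v ∈ S) (m : Nat) (u x : String)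
    (hu : u ∈ S) (hp : RPath dd original m u x) : x ∈ S := by
  induction m generalizing u with
  | zero => rw [path_zero] at hp; subst hp; exact hu
  | succ m IH =>
    obtain ⟨v, hv, hp'⟩ := (path_front dd original m u x).1 hp
    exact IH v (hS u hu v hv) hp'

theorem noPath_of_drained (dd : PySem.Dict String (List String)) (original oc tc : String)
    (seen : List String) (hoc : oc ∈ seen)
    (hclos : ∀ u ∈ seen, u ≠ tc ∧ ∀ v ∈ succs dd original u, v ∈ seen) :
    ¬ ∃ n, RPath dd original n oc tc := by
  rintro ⟨n, hp⟩
  have htc : tc ∈ seen :=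
    closedSet_path dd original seen (fun u hu => (hclos u hu).2) n oc tc hoc hp
  exact (hclos tc htc).1 rfl

theorem bfs_correct (dd : PySem.Dict String (List String)) (tc original oc : String)
    (fuel : Nat) (seen queue : List String)
    (hnd : seen.Nodup)
    (hsub : seen ⊆ oc :: dd.values.flatten)
    (hoc : oc ∈ seen)
    (hsound : ∀ x ∈ seen, ∃ n, RPath dd original n oc x)
    (hq : queue ⊆ seen)
    (hclos : ∀ u ∈ seen, u ∈ queue ∨ (u ≠ tc ∧ ∀ v ∈ succs dd original u, v ∈ seen))
    (hfuel : queue.length + dd.values.flatten.length + 1 ≤ fuel + seen.length) :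
    (bfsLoop dd tc original fuel seen queue = false ↔ ∃ n, RPath dd original n oc tc) := by
  induction fuel generalizing seen queue with
  | zero =>
    have hle : seen.length ≤ dd.values.flatten.length + 1 := by
      have := (List.subperm_of_subset hnd hsub).length_le
      simpa using this
    have hqe : queue = [] := by
      cases queue with
      | nil => rfl
      | cons a q =>
        exfalso
        simp only [List.length_cons] at hfuel
        omega
    subst hqe
    have hnone : ¬ ∃ n, RPath dd original n oc tc := by
      refine noPath_of_drained dd original oc tc seen hoc ?_
      intro u hu
      rcases hclos u hu with h | h
      · simp at h
      · exact h
    simp only [bfsLoop, List.isEmpty_nil]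
    constructor
    · intro h; exact absurd h (by simp)
    · intro h; exact absurd h hnone
  | succ fuel IH =>
    cases queue with
    | nil =>
      have hnone : ¬ ∃ n, RPath dd original n oc tc := by
        refine noPath_of_drained dd original oc tc seen hoc ?_
        intro u hu
        rcases hclos u hu with h | h
        · simp at h
        · exact h
      simp only [bfsLoop]
      constructor
      · intro h; exact absurd h (by simp)
      · intro h; exact absurd h hnone
    | cons u rest =>
      by_cases hu : u = tc
      · subst hu
        simp only [bfsLoop]
        constructor
        · intro _
          exact hsound u (hq List.mem_cons_self)
        · intro _; rfl
      · have hstep : bfsLoop dd tc original (fuel+1) seen (u :: rest)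
            = bfsLoop dd tc original fuel
                ((dd.getD u []).foldl (fun p2 w =>
                  if w ≠ original ∧ w ∉ p2.1 then (p2.1 ++ [w], p2.2 ++ [w]) else p2) (seen, rest)).1
                ((dd.getD u []).foldl (fun p2 w =>
                  if w ≠ original ∧ w ∉ p2.1 then (p2.1 ++ [w], p2.2 ++ [w]) else p2) (seen, rest)).2 := by
          simp only [bfsLoop]
          rw [if_neg hu]
        rw [hstep]
        set P := (dd.getD u []).foldl (fun p2 w =>
          if w ≠ original ∧ w ∉ p2.1 then (p2.1 ++ [w], p2.2 ++ [w]) else p2) (seen, rest) with hP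
        obtain ⟨ext, hE1, hE2⟩ := pairF_ext original (dd.getD u []) (seen, rest)
        rw [← hP] at hE1 hE2
        simp only at hE1 hE2
        have hmemP : ∀ x, x ∈ P.1 ↔ x ∈ seen ∨ x ∈ succs dd original u := by
          intro x
          rw [hP, mem_pairF_fst]
          simp only
          have hs : x ∈ succs dd original u ↔ (x ∈ dd.getD u [] ∧ x ≠ original) := by
            simp [succs, List.mem_filter]
          rw [hs]
        have hnd' : P.1.Nodup := by
          rw [hP]
          exact nodup_pairF_fst original _ (seen, rest) hnd
        have hsub' : P.1 ⊆ oc :: dd.values.flatten := by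
          intro x hx
          rcases (hmemP x).1 hx with hx | hx
          · exact hsub hx
          · exact List.mem_cons_of_mem _
              (getD_subset_flatten dd u x (List.mem_of_mem_filter hx))
        have hoc' : oc ∈ P.1 := (hmemP oc).2 (Or.inl hoc)
        have huseen : u ∈ seen := hq List.mem_cons_self
        have hsound' : ∀ x ∈ P.1, ∃ n, RPath dd original n oc x := by
          intro x hx
          rcases (hmemP x).1 hx with hx | hx
          · exact hsound x hx
          · obtain ⟨n, hn⟩ := hsound u huseen
            exact ⟨n+1, path_snoc dd original n oc u x hn hx⟩
        have hq' : P.2 ⊆ P.1 := by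
          intro x hx
          rw [hE2] at hx
          rcases List.mem_append.1 hx with hx | hx
          · exact (hmemP x).2 (Or.inl (hq (List.mem_cons_of_mem _ hx)))
          · rw [hE1]
            exact List.mem_append.2 (Or.inr hx)
        have hclos' : ∀ v ∈ P.1, v ∈ P.2 ∨ (v ≠ tc ∧ ∀ w ∈ succs dd original v, w ∈ P.1) := by
          intro v hv
          rw [hE1] at hv
          rcases List.mem_append.1 hv with hv | hv
          · rcases hclos v hv with h | h
            · rcases List.mem_cons.1 h with rfl | h
              · right
                refine ⟨hu, ?_⟩
                intro w hw
                exact (hmemP w).2 (Or.inr hw)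
              · left
                rw [hE2]
                exact List.mem_append.2 (Or.inl h)
            · right
              exact ⟨h.1, fun w hw => (hmemP w).2 (Or.inl (h.2 w hw))⟩
          · left
            rw [hE2]
            exact List.mem_append.2 (Or.inr hv)
        have hfuel' : P.2.length + dd.values.flatten.length + 1 ≤ fuel + P.1.length := by
          have l1 : P.1.length = seen.length + ext.length := by rw [hE1, List.length_append]
          have l2 : P.2.length = rest.length + ext.length := by rw [hE2, List.length_append]
          simp only [List.length_cons] at hfuel
          omega
        exact IH P.1 P.2 hnd' hsub' hoc' hsound' hq' hclos' hfuel'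

theorem alt_eq (d : List (String × List String)) (oc tc original : String) :
    check_alt d oc tc original
      = !(bIter (PySem.Dict.ofList d) original
          (((PySem.Dict.ofList d).values.map List.length).sum + 1) [oc]).contains tc := by
  set dd := PySem.Dict.ofList d with hdd
  have hiff : (bfsLoop dd tc original (dd.values.flatten.length + 2) [oc] [oc] = false) ↔
      ∃ n, RPath dd original n oc tc := by
    refine bfs_correct dd tc original oc (dd.values.flatten.length + 2) [oc] [oc]
      (List.nodup_singleton oc) ?_ List.mem_cons_self ?_ (fun x hx => hx) ?_ (by simp; omega)
    · intro x hx
      have hxo : x = oc := by simpa using hx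
      rw [hxo]
      exact List.mem_cons_self
    · intro x hx
      have hxo : x = oc := by simpa using hx
      rw [hxo]
      exact ⟨0, (path_zero dd original oc oc).2 rfl⟩
    · intro u hu
      exact Or.inl hu
  have hreach := closure_char dd original oc tc
  simp only [check_alt]
  by_cases h : ∃ n, RPath dd original n oc tc
  · rw [hiff.2 h]
    have hm : tc ∈ bIter dd original ((dd.values.map List.length).sum + 1) [oc] := hreach.2 h
    have hc : (bIter dd original ((dd.values.map List.length).sum + 1) [oc]).contains tc = true :=
      List.elem_eq_true_of_mem hm
    rw [hc]
    rfl
  · have hb : bfsLoop dd tc original (dd.values.flatten.length + 2) [oc] [oc] = true := by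
      cases hc : bfsLoop dd tc original (dd.values.flatten.length + 2) [oc] [oc]
      · exact absurd (hiff.1 hc) h
      · rfl
    rw [hb]
    have hc2 : (bIter dd original ((dd.values.map List.length).sum + 1) [oc]).contains tc = false := by
      cases hc : (bIter dd original ((dd.values.map List.length).sum + 1) [oc]).contains tc
      · rfl
      · exact absurd (hreach.1 (List.mem_of_elem_eq_true hc)) h
    rw [hc2]
    rfl

-- ===== VERDICT (by name: the statement is the Claim_ definition above) =====
theorem check_spec : Claim_equal_check := by
  intro d oc tc original _ hpre
  unfold Spec_check
  rw [alt_eq]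
  simp only [check]
  exact main_eq d oc tc original hpre
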